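-- pv_equiv track=rewrite | github.com/mamin27/ecomet_i2c_raspberry_tools | ecomet_i2c_sensors/emc2301/emc2301.py | word_lb
-- ===== SOURCE A (Python) =====
-- def word_lb (nm) :
--
--    list_lb = [16,8,4,2,1]
--    list_sum = [128,64,32,16,8]
--
--    sum = 0
--    tmp = nm
--    sum_lb = 0
--    for idx in range (0,5) :
--      if tmp >= list_lb[idx] :
--        sum_lb = sum_lb + list_sum[idx]
--        tmp = tmp - list_lb[idx]
--
--    return (sum_lb)
-- ===== SOURCE B (Python) =====
-- def word_lb(nm):
--     # Closed form: the greedy loop realises the binary decomposition of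
--     # min(nm, 31) clamped below at 0, and each weight is 8x its list_lb value.
--     return 8 * max(0, min(31, nm))
-- ===== Notes on version B (the rewrite author's own statement) =====
-- stated objective: simpler
-- what changed: Replaces the 5-step greedy bit-decomposition loop over parallel weight lists with the closed form 8*max(0,min(31,nm)).
import Mathlib
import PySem

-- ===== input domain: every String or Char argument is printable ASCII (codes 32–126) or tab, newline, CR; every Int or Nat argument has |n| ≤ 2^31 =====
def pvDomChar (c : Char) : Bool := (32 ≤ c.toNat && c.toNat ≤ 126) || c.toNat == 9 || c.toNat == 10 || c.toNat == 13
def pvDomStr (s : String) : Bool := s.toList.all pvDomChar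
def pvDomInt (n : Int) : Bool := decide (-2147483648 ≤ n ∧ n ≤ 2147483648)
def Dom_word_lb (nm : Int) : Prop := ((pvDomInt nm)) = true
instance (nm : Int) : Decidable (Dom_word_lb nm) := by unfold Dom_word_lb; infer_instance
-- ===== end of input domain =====

-- B replaces A's greedy bit-decomposition loop with the closed form 8*max(0,min(31,nm)) (simpler).
-- ===== PORT A =====
def word_lb (nm : Int) : Int :=
  -- list_lb / list_sum and the 5-iteration greedy loop, transliterated.
  -- list indexing uses pyGet? with getD 0; the index is always in range (0..4).
  let list_lb : List Int := [16, 8, 4, 2, 1]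
  let list_sum : List Int := [128, 64, 32, 16, 8]
  let st := (PySem.List.pyRange 0 5 1).foldl
    (fun (st : Int × Int) (idx : Int) =>
      let (sum_lb, tmp) := st
      if tmp ≥ (PySem.List.pyGet? list_lb idx).getD 0 then
        (sum_lb + (PySem.List.pyGet? list_sum idx).getD 0, tmp - (PySem.List.pyGet? list_lb idx).getD 0)
      else (sum_lb, tmp))
    ((0 : Int), nm)
  st.1

-- ===== PORT B =====
def word_lb_alt (nm : Int) : Int :=
  8 * max 0 (min 31 nm)

-- ===== PRECONDITION & SPEC =====
def Spec_word_lb (nm : Int) (out : Int) : Prop := out = word_lb_alt nm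
instance (nm : Int) (out : Int) : Decidable (Spec_word_lb nm out) := by unfold Spec_word_lb; infer_instance

-- ===== CLAIM (what is proved, stated in full; the proofs are below) =====
def Claim_equal_word_lb : Prop := ∀ (nm : Int), Dom_word_lb nm → Spec_word_lb nm (word_lb nm)

-- ===== LEMMAS AND PROOFS =====

-- ===== VERDICT (by name: the statement is the Claim_ definition above) =====
theorem word_lb_spec : Claim_equal_word_lb := by
  intro nm _
  unfold Spec_word_lb word_lb word_lb_alt
  simp only [show PySem.List.pyRange 0 5 1 = [0, 1, 2, 3, 4] from by decide, List.foldl]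
  simp only [show (PySem.List.pyGet? ([16,8,4,2,1] : List Int) 0).getD 0 = 16 from by decide,
    show (PySem.List.pyGet? ([16,8,4,2,1] : List Int) 1).getD 0 = 8 from by decide,
    show (PySem.List.pyGet? ([16,8,4,2,1] : List Int) 2).getD 0 = 4 from by decide,
    show (PySem.List.pyGet? ([16,8,4,2,1] : List Int) 3).getD 0 = 2 from by decide,
    show (PySem.List.pyGet? ([16,8,4,2,1] : List Int) 4).getD 0 = 1 from by decide,
    show (PySem.List.pyGet? ([128,64,32,16,8] : List Int) 0).getD 0 = 128 from by decide,
    show (PySem.List.pyGet? ([128,64,32,16,8] : List Int) 1).getD 0 = 64 from by decide,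
    show (PySem.List.pyGet? ([128,64,32,16,8] : List Int) 2).getD 0 = 32 from by decide,
    show (PySem.List.pyGet? ([128,64,32,16,8] : List Int) 3).getD 0 = 16 from by decide,
    show (PySem.List.pyGet? ([128,64,32,16,8] : List Int) 4).getD 0 = 8 from by decide]
  split_ifs <;> simp_all <;> omega
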